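-- pv_equiv track=rewrite | github.com/adnope/ai-project | app.py | dfs_find_sequence
-- ===== SOURCE A (Python) =====
-- def dfs_find_sequence(target_board, curr_board, move_seq, curr_player, piece_count):
--     """Find sequence of moves using DFS"""
--     # Base case: if we've placed all the pieces in the target board
--     if piece_count == 0:
--         return curr_board == target_board
--
--     # Try each column
--     for col in range(7):
--         # Find lowest empty row in this column
--         row = 5
--         while row >= 0 and curr_board[row][col] != 0:
--             row -= 1
--
--         # If column is not full
--         if row >= 0:
--             # Make the move only if it matches target board
--             if target_board[row][col] == curr_player:
--                 curr_board[row][col] = curr_player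
--                 move_seq.append(col + 1)
--                 piece_count -= 1
--
--                 # Recursively try next move with other player
--                 next_player = 2 if curr_player == 1 else 1
--                 if dfs_find_sequence(target_board, curr_board, move_seq,
--                                    next_player, piece_count):
--                     return True
--
--                 # If this path didn't work, undo the move
--                 curr_board[row][col] = 0
--                 move_seq.pop()
--                 piece_count += 1
--
--     return False
-- ===== SOURCE B (Python) =====
-- def dfs_find_sequence(target_board, curr_board, move_seq, curr_player, piece_count):
--     """Iterative backtracking: one loop over an explicit stack of
--     (col, row, player) frames instead of recursion; same mutations as A."""
--     stack = []
--     player = curr_player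
--     pc = piece_count
--     c = 0
--     while True:
--         if pc == 0:
--             if curr_board == target_board:
--                 return True
--             c = 7  # force a backtrack
--         placed = False
--         while c < 7:
--             row = 5
--             while row >= 0 and curr_board[row][c] != 0:
--                 row -= 1
--             if row >= 0 and target_board[row][c] == player:
--                 curr_board[row][c] = player
--                 move_seq.append(c + 1)
--                 pc -= 1
--                 stack.append((c, row, player))
--                 player = 2 if player == 1 else 1
--                 c = 0
--                 placed = True
--                 break
--             c += 1
--         if placed:
--             continue
--         if not stack:
--             return False
--         c0, row0, pl = stack.pop()
--         player = pl
--         curr_board[row0][c0] = 0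
--         move_seq.pop()
--         pc += 1
--         c = c0 + 1
-- ===== Notes on version B (the rewrite author's own statement) =====
-- stated objective: alternative
-- what changed: A's recursive mutate-and-undo DFS is replaced by an iterative single-loop backtracker over an explicit stack of (col,row,player) frames: push on a legal matching move, pop/undo when columns 0..6 are exhausted, returning True exactly when piece_count reaches 0 on a matching board.
import Mathlib
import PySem

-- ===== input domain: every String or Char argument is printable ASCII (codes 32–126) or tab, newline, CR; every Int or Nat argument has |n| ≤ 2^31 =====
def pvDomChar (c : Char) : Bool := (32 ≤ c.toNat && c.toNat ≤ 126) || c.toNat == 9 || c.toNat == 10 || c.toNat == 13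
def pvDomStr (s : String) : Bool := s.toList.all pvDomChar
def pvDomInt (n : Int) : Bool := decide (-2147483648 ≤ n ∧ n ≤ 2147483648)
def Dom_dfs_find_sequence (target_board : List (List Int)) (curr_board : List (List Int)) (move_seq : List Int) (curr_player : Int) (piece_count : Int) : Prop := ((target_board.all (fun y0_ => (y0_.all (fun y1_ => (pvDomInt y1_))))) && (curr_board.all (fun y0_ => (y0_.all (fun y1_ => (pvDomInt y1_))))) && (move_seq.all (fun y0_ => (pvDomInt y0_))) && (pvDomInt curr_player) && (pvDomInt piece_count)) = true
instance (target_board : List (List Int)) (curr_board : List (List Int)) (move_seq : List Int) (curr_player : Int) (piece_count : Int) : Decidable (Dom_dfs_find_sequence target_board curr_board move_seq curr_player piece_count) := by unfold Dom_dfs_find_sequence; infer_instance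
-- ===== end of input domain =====

-- B replaces A's recursive mutate-and-undo DFS by an iterative single-loop
-- backtracker over an explicit stack of (col,row,player) frames (objective:
-- alternative decomposition). Both Pythons mutate curr_board/move_seq
-- identically on success and restore them on failure; the equivalence proved
-- here is about the returned Bool only.

-- ===== PORT A =====
-- Total cell lookup: board[row][col]; out-of-range reads (Python IndexError) are
-- excluded by Pre_dfs_find_sequence, so the default 0 is never observed there.
def pvCell (b : List (List Int)) (r c : Int) : Int :=
  ((b.getD r.toNat []).getD c.toNat 0)

-- `row = 5; while row >= 0 and board[row][col] != 0: row -= 1`; call with fuel 6.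
def pvFindRow (b : List (List Int)) (c : Int) : Nat → Int
  | 0 => -1
  | k+1 => if pvCell b (k : Int) c ≠ 0 then pvFindRow b c k else (k : Int)

-- board[row][col] = v (as a value); only used with in-range row/col.
def pvSet (b : List (List Int)) (r c v : Int) : List (List Int) :=
  b.set r.toNat ((b.getD r.toNat []).set c.toNat v)

-- A's recursion, totalized by fuel: every call after the first places a value into
-- a zero cell of the 6×7 region (at most one placement per path can rewrite a zero),
-- so the depth is ≤ 44 and the constant fuel 50 is never exhausted on Python's runs.
mutual
def dfsA (tb : List (List Int)) : Nat → List (List Int) → Int → Int → Bool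
  | 0, _, _, _ => false
  | (fuel+1), cb, player, pc =>
    if pc = 0 then decide (cb = tb)
    else colsA tb fuel cb player pc [0, 1, 2, 3, 4, 5, 6]

def colsA (tb : List (List Int)) (fuel : Nat) (cb : List (List Int)) (player pc : Int) : List Int → Bool
  | [] => false
  | col :: rest =>
    let row := pvFindRow cb col 6
    if 0 ≤ row then
      if pvCell tb row col = player then
        if dfsA tb fuel (pvSet cb row col player) (if player = 1 then 2 else 1) (pc - 1) then true
        else colsA tb fuel cb player pc rest
      else colsA tb fuel cb player pc rest
    else colsA tb fuel cb player pc rest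
end

def dfs_find_sequence (target_board : List (List Int)) (curr_board : List (List Int)) (move_seq : List Int) (curr_player : Int) (piece_count : Int) : Bool :=
  dfsA target_board 50 curr_board curr_player piece_count

-- ===== PORT B =====
def pvOther (p : Int) : Int := if p = 1 then 2 else 1

-- the columns still to try at the current frame: `while c < 7` scanning from c
def colsFrom (c : Int) : List Int := [0, 1, 2, 3, 4, 5, 6].drop c.toNat

-- the inner `while c < 7` loop: first column ≥ c with a legal matching move
def scanCols (tb b : List (List Int)) (p : Int) : List Int → Option (Int × Int)
  | [] => none
  | col :: rest =>
    let row := pvFindRow b col 6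
    if 0 ≤ row ∧ pvCell tb row col = p then some (col, row)
    else scanCols tb b p rest

-- fuel for the machine (counts outer-loop iterations); mCost 50 bounds the run
def mCost : Nat → Nat
  | 0 => 16
  | k+1 => 8 * mCost k + 16

-- one outer-loop iteration per unit of fuel: check pc, scan for a move, push a
-- frame (col,row,player) on a placement, else pop/undo the top frame
def runM (tb : List (List Int)) : Nat → List (List Int) → Int → Int → Int → List (Int × Int × Int) → Option Bool
  | 0, _, _, _, _, _ => none
  | f+1, b, p, pc, c, stk =>
    if pc = 0 then
      if b = tb then some true
      else
        match stk with
        | [] => some false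
        | (col, row, pl) :: stk' => runM tb f (pvSet b row col 0) pl (pc + 1) (col + 1) stk'
    else
      match scanCols tb b p (colsFrom c) with
      | some (col, row) => runM tb f (pvSet b row col p) (pvOther p) (pc - 1) 0 ((col, row, p) :: stk)
      | none =>
        match stk with
        | [] => some false
        | (col, row, pl) :: stk' => runM tb f (pvSet b row col 0) pl (pc + 1) (col + 1) stk'

def dfs_find_sequence_alt (target_board : List (List Int)) (curr_board : List (List Int)) (move_seq : List Int) (curr_player : Int) (piece_count : Int) : Bool :=
  match runM target_board (mCost 50) curr_board curr_player piece_count 0 [] with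
  | some r => r
  | none => false

-- ===== PRECONDITION & SPEC =====
-- Pre_ excludes inputs with piece_count ≠ 0 whose boards are not at least 6 rows of
-- at least 7 columns: there both Pythons index out of range and raise IndexError
-- (except in the accidental corner where curr_board's 6×7 region is already full and
-- only target_board is malformed, where both A and B return False unread).
def Pre_dfs_find_sequence (target_board : List (List Int)) (curr_board : List (List Int)) (move_seq : List Int) (curr_player : Int) (piece_count : Int) : Prop :=
  piece_count = 0 ∨
    (6 ≤ target_board.length ∧ 6 ≤ curr_board.length ∧
     (∀ r ∈ target_board, 7 ≤ r.length) ∧ (∀ r ∈ curr_board, 7 ≤ r.length))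
instance (target_board : List (List Int)) (curr_board : List (List Int)) (move_seq : List Int) (curr_player : Int) (piece_count : Int) : Decidable (Pre_dfs_find_sequence target_board curr_board move_seq curr_player piece_count) := by unfold Pre_dfs_find_sequence; infer_instance

def pvWitness_dfs_find_sequence : List (List Int) × List (List Int) × List Int × Int × Int :=
  ([[0,0,0,0,0,0,0],[0,0,0,0,0,0,0],[0,0,0,0,0,0,0],[0,0,0,0,0,0,0],[0,0,0,0,0,0,0],[1,0,0,0,0,0,0]],
   [[0,0,0,0,0,0,0],[0,0,0,0,0,0,0],[0,0,0,0,0,0,0],[0,0,0,0,0,0,0],[0,0,0,0,0,0,0],[0,0,0,0,0,0,0]],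
   [], 1, 1)

def Spec_dfs_find_sequence (target_board : List (List Int)) (curr_board : List (List Int)) (move_seq : List Int) (curr_player : Int) (piece_count : Int) (out : Bool) : Prop := out = dfs_find_sequence_alt target_board curr_board move_seq curr_player piece_count
instance (target_board : List (List Int)) (curr_board : List (List Int)) (move_seq : List Int) (curr_player : Int) (piece_count : Int) (out : Bool) : Decidable (Spec_dfs_find_sequence target_board curr_board move_seq curr_player piece_count out) := by unfold Spec_dfs_find_sequence; infer_instance

-- ===== CLAIM (what is proved, stated in full; the proofs are below) =====
def Claim_equal_dfs_find_sequence : Prop := ∀ (target_board : List (List Int)) (curr_board : List (List Int)) (move_seq : List Int) (curr_player : Int) (piece_count : Int), Dom_dfs_find_sequence target_board curr_board move_seq curr_player piece_count → Pre_dfs_find_sequence target_board curr_board move_seq curr_player piece_count → Spec_dfs_find_sequence target_board curr_board move_seq curr_player piece_count (dfs_find_sequence target_board curr_board move_seq curr_player piece_count)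

-- ===== LEMMAS AND PROOFS =====

theorem pvWitness_ok :
    Dom_dfs_find_sequence (pvWitness_dfs_find_sequence.1) (pvWitness_dfs_find_sequence.2.1) (pvWitness_dfs_find_sequence.2.2.1) (pvWitness_dfs_find_sequence.2.2.2.1) (pvWitness_dfs_find_sequence.2.2.2.2) ∧
    Pre_dfs_find_sequence (pvWitness_dfs_find_sequence.1) (pvWitness_dfs_find_sequence.2.1) (pvWitness_dfs_find_sequence.2.2.1) (pvWitness_dfs_find_sequence.2.2.2.1) (pvWitness_dfs_find_sequence.2.2.2.2) := by
  constructor <;> decide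

-- board shape admitted by Pre_ (for curr_board)
def Shape (b : List (List Int)) : Prop := 6 ≤ b.length ∧ ∀ r ∈ b, 7 ≤ r.length

-- number of empty cells of the 6×7 region (termination measure for A's fuel)
def zeros42 (b : List (List Int)) : Nat :=
  ∑ r ∈ Finset.range 6, ∑ c ∈ Finset.range 7, (if pvCell b (r : Int) (c : Int) = 0 then 1 else 0)

-- A-side value of a machine state (b, p, pc, c): what dfsA computes from there
def sres (tb : List (List Int)) (g : Nat) (b : List (List Int)) (p pc c : Int) : Bool :=
  if pc = 0 then decide (b = tb) else colsA tb g b p pc (colsFrom c)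

-- the backtracking step the machine takes once the current subtree is exhausted
def popRun (tb : List (List Int)) (f : Nat) (b : List (List Int)) (pc : Int) : List (Int × Int × Int) → Option Bool
  | [] => some false
  | (col, row, pl) :: stk' => runM tb f (pvSet b row col 0) pl (pc + 1) (col + 1) stk'

theorem getD_set_int (l : List Int) (i : Nat) (v d : Int) (h : i < l.length) (j : Nat) :
    (l.set i v).getD j d = if j = i then v else l.getD j d := by
  simp only [List.getD, List.getElem?_set]
  by_cases hj : j = i
  · subst hj; simp [h]
  · simp [Ne.symm hj, hj]

theorem getD_set_row (l : List (List Int)) (i : Nat) (v : List Int) (h : i < l.length) (j : Nat) :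
    (l.set i v).getD j [] = if j = i then v else l.getD j [] := by
  simp only [List.getD, List.getElem?_set]
  by_cases hj : j = i
  · subst hj; simp [h]
  · simp [Ne.symm hj, hj]

theorem pvCell_pvSet (b : List (List Int)) (R C v r c : Int)
    (hR : R.toNat < b.length) (hC : C.toNat < (b.getD R.toNat []).length) :
    pvCell (pvSet b R C v) r c = if r.toNat = R.toNat ∧ c.toNat = C.toNat then v else pvCell b r c := by
  unfold pvCell pvSet
  rw [getD_set_row _ _ _ hR]
  by_cases hr : r.toNat = R.toNat
  · rw [if_pos hr, hr, getD_set_int _ _ _ _ hC]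
    by_cases hc : c.toNat = C.toNat
    · simp [hc]
    · simp [hc]
  · simp [hr]

theorem shape_pvSet (b : List (List Int)) (R C v : Int) (h : Shape b) : Shape (pvSet b R C v) := by
  obtain ⟨h1, h2⟩ := h
  by_cases hR : R.toNat < b.length
  · refine ⟨by simpa [pvSet] using h1, ?_⟩
    intro r hr
    rcases List.mem_or_eq_of_mem_set hr with hmem | heq
    · exact h2 r hmem
    · subst heq
      rw [List.length_set]
      exact h2 _ (List.getD_eq_getElem b [] hR ▸ List.getElem_mem hR)
  · unfold pvSet
    rw [List.set_eq_of_length_le (by omega)]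
    exact ⟨h1, h2⟩

theorem pvSet_same (b : List (List Int)) (R C : Int)
    (hR : R.toNat < b.length) (hC : C.toNat < (b.getD R.toNat []).length)
    (h0 : pvCell b R C = 0) : pvSet b R C 0 = b := by
  unfold pvSet
  have hrow : (b.getD R.toNat []).set C.toNat 0 = b.getD R.toNat [] := by
    have : (b.getD R.toNat [])[C.toNat] = 0 := by
      unfold pvCell at h0
      rw [List.getD_eq_getElem _ _ hC] at h0
      exact h0
    calc (b.getD R.toNat []).set C.toNat 0
        = (b.getD R.toNat []).set C.toNat (b.getD R.toNat [])[C.toNat] := by rw [this]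
      _ = b.getD R.toNat [] := List.set_getElem_self hC
  rw [hrow, List.getD_eq_getElem _ _ hR, List.set_getElem_self hR]

theorem pvSet_undo (b : List (List Int)) (R C v : Int)
    (hR : R.toNat < b.length) (hC : C.toNat < (b.getD R.toNat []).length)
    (h0 : pvCell b R C = 0) : pvSet (pvSet b R C v) R C 0 = b := by
  have hrow0 : (b.getD R.toNat [])[C.toNat] = 0 := by
    unfold pvCell at h0
    rw [List.getD_eq_getElem _ _ hC] at h0
    exact h0
  unfold pvSet
  rw [getD_set_row _ _ _ hR, if_pos rfl, List.set_set, List.set_set]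
  have : (b.getD R.toNat []).set C.toNat 0 = b.getD R.toNat [] := by
    calc (b.getD R.toNat []).set C.toNat 0
        = (b.getD R.toNat []).set C.toNat (b.getD R.toNat [])[C.toNat] := by rw [hrow0]
      _ = b.getD R.toNat [] := List.set_getElem_self hC
  rw [this, List.getD_eq_getElem _ _ hR, List.set_getElem_self hR]

theorem findRow_spec (b : List (List Int)) (c : Int) :
    ∀ k : Nat, 0 ≤ pvFindRow b c k → pvFindRow b c k < (k : Int) ∧ pvCell b (pvFindRow b c k) c = 0 := by
  intro k
  induction k with
  | zero => intro h; simp [pvFindRow] at h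
  | succ k ih =>
    intro h
    by_cases hc : pvCell b (k : Int) c ≠ 0
    · rw [pvFindRow, if_pos hc] at h ⊢
      obtain ⟨h1, h2⟩ := ih h
      exact ⟨by push_cast; omega, h2⟩
    · rw [pvFindRow, if_neg hc] at h ⊢
      rw [not_not] at hc
      exact ⟨by push_cast; omega, by simpa using hc⟩

theorem zeros42_le (b : List (List Int)) : zeros42 b ≤ 42 := by
  unfold zeros42
  calc ∑ r ∈ Finset.range 6, ∑ c ∈ Finset.range 7, (if pvCell b (r : Int) (c : Int) = 0 then 1 else 0)
      ≤ ∑ _r ∈ Finset.range 6, 7 := by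
        apply Finset.sum_le_sum
        intro r _
        calc ∑ c ∈ Finset.range 7, (if pvCell b (r : Int) (c : Int) = 0 then 1 else 0)
            ≤ ∑ _c ∈ Finset.range 7, 1 := Finset.sum_le_sum (fun c _ => by split <;> omega)
          _ = 7 := by simp
    _ = 42 := by simp

theorem zeros42_dec (b : List (List Int)) (R C v : Int) (hsh : Shape b)
    (hR0 : 0 ≤ R) (hR : R < 6) (hC0 : 0 ≤ C) (hC : C < 7)
    (h0 : pvCell b R C = 0) (hv : v ≠ 0) :
    zeros42 (pvSet b R C v) + 1 = zeros42 b := by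
  have hRlen : R.toNat < b.length := by have := hsh.1; omega
  have hrowmem : b.getD R.toNat [] ∈ b := List.getD_eq_getElem b [] hRlen ▸ List.getElem_mem hRlen
  have hClen : C.toNat < (b.getD R.toNat []).length := lt_of_lt_of_le (by omega) (hsh.2 _ hrowmem)
  have hcell : ∀ r c : Nat, pvCell (pvSet b R C v) (r : Int) (c : Int)
      = if r = R.toNat ∧ c = C.toNat then v else pvCell b (r : Int) (c : Int) := by
    intro r c
    rw [pvCell_pvSet b R C v _ _ hRlen hClen]
    simp
  have hR6 : R.toNat ∈ Finset.range 6 := Finset.mem_range.mpr (by omega)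
  have hC7 : C.toNat ∈ Finset.range 7 := Finset.mem_range.mpr (by omega)
  have inner_eq : ∀ r ∈ (Finset.range 6).erase R.toNat,
      (∑ c ∈ Finset.range 7, (if pvCell (pvSet b R C v) (r : Int) (c : Int) = 0 then 1 else 0))
        = (∑ c ∈ Finset.range 7, (if pvCell b (r : Int) (c : Int) = 0 then 1 else 0)) := by
    intro r hr
    have hrne : r ≠ R.toNat := (Finset.mem_erase.mp hr).1
    refine Finset.sum_congr rfl (fun c _ => ?_)
    rw [hcell]
    simp [hrne]
  have restc_eq : ∀ c ∈ (Finset.range 7).erase C.toNat,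
      (if pvCell (pvSet b R C v) (R.toNat : Int) (c : Int) = 0 then 1 else 0)
        = (if pvCell b (R.toNat : Int) (c : Int) = 0 then 1 else 0) := by
    intro c hc
    have hcne : c ≠ C.toNat := (Finset.mem_erase.mp hc).1
    rw [hcell]
    simp [hcne]
  have tnew : (if pvCell (pvSet b R C v) (R.toNat : Int) (C.toNat : Int) = 0 then 1 else 0) = 0 := by
    rw [hcell]
    simp [hv]
  have hcast : pvCell b (R.toNat : Int) (C.toNat : Int) = pvCell b R C := by
    unfold pvCell
    simp only [Int.toNat_natCast]
  have told : (if pvCell b (R.toNat : Int) (C.toNat : Int) = 0 then (1 : Nat) else 0) = 1 := by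
    rw [hcast, h0]
    simp
  unfold zeros42
  rw [← Finset.add_sum_erase _ _ hR6, ← Finset.add_sum_erase _ _ hR6,
      Finset.sum_congr rfl inner_eq,
      ← Finset.add_sum_erase _ _ hC7, ← Finset.add_sum_erase _ _ hC7,
      Finset.sum_congr rfl restc_eq, tnew, told]
  omega

theorem dfsA_succ (tb b : List (List Int)) (g : Nat) (p pc : Int) :
    dfsA tb (g + 1) b p pc = sres tb g b p pc 0 := by
  rw [dfsA]
  unfold sres colsFrom
  norm_num

theorem colsFrom_head (c col : Int) (rest : List Int) (h : colsFrom c = col :: rest) :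
    0 ≤ col ∧ col < 7 ∧ rest = colsFrom (col + 1) := by
  unfold colsFrom at h
  generalize hg : c.toNat = k at h
  have hk : k < 7 := by
    by_contra hk
    rw [List.drop_eq_nil_of_le (by simp; omega)] at h
    simp at h
  interval_cases k <;>
    · simp only [List.drop] at h
      obtain ⟨h1, h2⟩ := List.cons.injEq .. ▸ h
      subst h1
      subst h2
      refine ⟨by norm_num, by norm_num, by decide⟩

theorem colsFrom_len (c : Int) : (colsFrom c).length ≤ 7 := by
  simp [colsFrom]

theorem runM_congr_scan (tb b : List (List Int)) (p pc c c' : Int) (stk : List (Int × Int × Int))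
    (hpc : ¬ pc = 0) (h : scanCols tb b p (colsFrom c) = scanCols tb b p (colsFrom c')) :
    ∀ F, runM tb F b p pc c stk = runM tb F b p pc c' stk := by
  intro F
  cases F with
  | zero => rfl
  | succ f => simp only [runM, if_neg hpc, h]

theorem mCost_ge (g : Nat) : 16 ≤ mCost g := by
  induction g with
  | zero => simp [mCost]
  | succ g ih => rw [mCost]; omega

theorem mCost_le_succ (g : Nat) : mCost g ≤ mCost (g + 1) := by
  have := mCost_ge g
  rw [mCost]; omega

theorem pvOther_ne (p : Int) : pvOther p ≠ 0 := by
  unfold pvOther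
  split <;> omega


theorem simZero (tb : List (List Int)) (g : Nat) (b : List (List Int)) (p pc c : Int)
    (stk : List (Int × Int × Int)) (hpc : pc = 0) :
    ∃ n, n + 1 ≤ mCost g ∧ ∀ f, runM tb (n + f + 1) b p pc c stk =
      (if sres tb g b p pc c then some true else popRun tb f b pc stk) := by
  refine ⟨0, by have := mCost_ge g; omega, ?_⟩
  intro f
  rw [show 0 + f + 1 = f + 1 from by omega]
  unfold sres
  rw [if_pos hpc]
  simp only [runM, if_pos hpc]
  by_cases hb : b = tb
  · simp [hb]
  · simp only [decide_eq_true_eq, hb, if_false]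
    cases stk with
    | nil => simp [popRun]
    | cons fr stk' =>
      obtain ⟨col, row, pl⟩ := fr
      simp [popRun]

-- the inner induction over the remaining columns of one frame
theorem simInner (tb : List (List Int)) (g : Nat)
    (IH : ∀ (b : List (List Int)) (p pc c : Int) (stk : List (Int × Int × Int)),
      (pc = 0 ∨ (Shape b ∧ zeros42 b + (if p = 0 then 2 else 1) ≤ g)) →
      ∃ n, n + 1 ≤ mCost g ∧ ∀ f, runM tb (n + f + 1) b p pc c stk =
        (if sres tb g b p pc c then some true else popRun tb f b pc stk)) :
    ∀ (cs : List Int) (c : Int), colsFrom c = cs →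
    ∀ (b : List (List Int)) (p pc : Int) (stk : List (Int × Int × Int)),
      Shape b → ¬ pc = 0 → zeros42 b + (if p = 0 then 2 else 1) ≤ g + 1 →
      ∃ n, n ≤ cs.length * (mCost g + 2) ∧ ∀ f, runM tb (n + f + 1) b p pc c stk =
        (if colsA tb (g + 1) b p pc cs then some true else popRun tb f b pc stk) := by
  intro cs
  induction cs with
  | nil =>
    intro c hcs b p pc stk hsh hpc hfs
    refine ⟨0, Nat.zero_le _, ?_⟩
    intro f
    rw [show 0 + f + 1 = f + 1 from by omega]
    simp only [runM, if_neg hpc, hcs, scanCols, colsA]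
    simp only [Bool.false_eq_true, if_false]
    cases stk with
    | nil => simp [popRun]
    | cons fr stk' =>
      obtain ⟨col, row, pl⟩ := fr
      simp [popRun]
  | cons col rest ihrest =>
    intro c hcs b p pc stk hsh hpc hfs
    obtain ⟨hcol0, hcol7, hrest⟩ := colsFrom_head c col rest hcs
    by_cases hcond : 0 ≤ pvFindRow b col 6 ∧ pvCell tb (pvFindRow b col 6) col = p
    · -- a legal matching move at (col,row): the machine pushes a frame
      obtain ⟨hrlt, hcell0⟩ := findRow_spec b col 6 hcond.1
      have hR0 : 0 ≤ pvFindRow b col 6 := hcond.1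
      have hrlt6 : pvFindRow b col 6 < 6 := by exact_mod_cast hrlt
      have hRlen : (pvFindRow b col 6).toNat < b.length := by have := hsh.1; omega
      have hrowmem : b.getD (pvFindRow b col 6).toNat [] ∈ b :=
        List.getD_eq_getElem b [] hRlen ▸ List.getElem_mem hRlen
      have hClen : col.toNat < (b.getD (pvFindRow b col 6).toNat []).length :=
        lt_of_lt_of_le (by omega) (hsh.2 _ hrowmem)
      have hundo : pvSet (pvSet b (pvFindRow b col 6) col p) (pvFindRow b col 6) col 0 = b :=
        pvSet_undo b (pvFindRow b col 6) col p hRlen hClen hcell0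
      have hsh' : Shape (pvSet b (pvFindRow b col 6) col p) := shape_pvSet _ _ _ _ hsh
      have hfs' : zeros42 (pvSet b (pvFindRow b col 6) col p) + (if pvOther p = 0 then 2 else 1) ≤ g := by
        rw [if_neg (pvOther_ne p)]
        by_cases hp : p = 0
        · have hb' : pvSet b (pvFindRow b col 6) col p = b := by
            rw [hp]
            exact pvSet_same b (pvFindRow b col 6) col hRlen hClen hcell0
          rw [hb']
          rw [if_pos hp] at hfs
          omega
        · have hdec := zeros42_dec b (pvFindRow b col 6) col p hsh hR0 hrlt6 hcol0 hcol7 hcell0 hp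
          rw [if_neg hp] at hfs
          omega
      obtain ⟨n1, hn1, heq1⟩ := IH (pvSet b (pvFindRow b col 6) col p) (pvOther p) (pc - 1) 0
        ((col, pvFindRow b col 6, p) :: stk) (Or.inr ⟨hsh', hfs'⟩)
      have hscan : scanCols tb b p (colsFrom c) = some (col, pvFindRow b col 6) := by
        rw [hcs]
        simp only [scanCols]
        rw [if_pos hcond]
      have hstep : ∀ F, runM tb (F + 1) b p pc c stk
          = runM tb F (pvSet b (pvFindRow b col 6) col p) (pvOther p) (pc - 1) 0 ((col, pvFindRow b col 6, p) :: stk) := by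
        intro F
        simp only [runM, if_neg hpc, hscan]
      have hpop : ∀ f, popRun tb f (pvSet b (pvFindRow b col 6) col p) (pc - 1) ((col, pvFindRow b col 6, p) :: stk)
          = runM tb f b p pc (col + 1) stk := by
        intro f
        simp only [popRun]
        rw [hundo, Int.sub_add_cancel]
      have hchildA : dfsA tb (g + 1) (pvSet b (pvFindRow b col 6) col p) (if p = 1 then 2 else 1) (pc - 1)
          = sres tb g (pvSet b (pvFindRow b col 6) col p) (pvOther p) (pc - 1) 0 := by
        rw [show (if p = 1 then (2 : Int) else 1) = pvOther p from rfl]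
        exact dfsA_succ tb _ g _ _
      by_cases hchild : sres tb g (pvSet b (pvFindRow b col 6) col p) (pvOther p) (pc - 1) 0 = true
      · refine ⟨n1 + 1, ?_, ?_⟩
        · calc n1 + 1 ≤ mCost g + 2 := by omega
            _ ≤ (col :: rest).length * (mCost g + 2) := Nat.le_mul_of_pos_left _ (by simp)
        · intro f
          rw [show n1 + 1 + f + 1 = (n1 + f + 1) + 1 from by omega, hstep, heq1, if_pos hchild]
          have hcolsA : colsA tb (g + 1) b p pc (col :: rest) = true := by
            simp only [colsA]
            rw [if_pos hcond.1, if_pos hcond.2, hchildA, hchild]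
            simp
          rw [hcolsA]
          simp
      · obtain ⟨n2, hn2, heq2⟩ := ihrest (col + 1) hrest.symm b p pc stk hsh hpc hfs
        have hchildf : sres tb g (pvSet b (pvFindRow b col 6) col p) (pvOther p) (pc - 1) 0 = false :=
          Bool.eq_false_iff.mpr hchild
        refine ⟨n1 + n2 + 2, ?_, ?_⟩
        · have hX : (col :: rest).length * (mCost g + 2) = rest.length * (mCost g + 2) + (mCost g + 2) := by
            simp [List.length_cons]
            ring
          omega
        · intro f
          rw [show n1 + n2 + 2 + f + 1 = (n1 + (n2 + f + 1) + 1) + 1 from by omega,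
              hstep, heq1 (n2 + f + 1), hchildf]
          simp only [Bool.false_eq_true, if_false]
          rw [hpop, heq2]
          have hcolsA : colsA tb (g + 1) b p pc (col :: rest) = colsA tb (g + 1) b p pc rest := by
            simp only [colsA]
            rw [if_pos hcond.1, if_pos hcond.2, hchildA, hchildf]
            simp
          rw [hcolsA]
    · -- no legal matching move at col: the scan skips it inside the same iteration
      have hscan : scanCols tb b p (colsFrom c) = scanCols tb b p (colsFrom (col + 1)) := by
        rw [hcs]
        simp only [scanCols]
        rw [if_neg hcond, hrest]
      obtain ⟨n2, hn2, heq2⟩ := ihrest (col + 1) hrest.symm b p pc stk hsh hpc hfs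
      refine ⟨n2, ?_, ?_⟩
      · calc n2 ≤ rest.length * (mCost g + 2) := hn2
          _ ≤ (col :: rest).length * (mCost g + 2) := Nat.mul_le_mul_right _ (by simp)
      · intro f
        rw [runM_congr_scan tb b p pc c (col + 1) stk hpc hscan, heq2]
        have hcolsA : colsA tb (g + 1) b p pc (col :: rest) = colsA tb (g + 1) b p pc rest := by
          simp only [colsA]
          by_cases h1 : 0 ≤ pvFindRow b col 6
          · rw [if_pos h1, if_neg (fun hc => hcond ⟨h1, hc⟩)]
          · rw [if_neg h1]
        rw [hcolsA]

-- the simulation: the machine explores exactly A's subtree, then backtracks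
theorem simMain (tb : List (List Int)) :
    ∀ (g : Nat) (b : List (List Int)) (p pc c : Int) (stk : List (Int × Int × Int)),
      (pc = 0 ∨ (Shape b ∧ zeros42 b + (if p = 0 then 2 else 1) ≤ g)) →
      ∃ n, n + 1 ≤ mCost g ∧ ∀ f, runM tb (n + f + 1) b p pc c stk =
        (if sres tb g b p pc c then some true else popRun tb f b pc stk) := by
  intro g
  induction g with
  | zero =>
    intro b p pc c stk hyp
    rcases hyp with hpc | ⟨_, hfs⟩
    · exact simZero tb 0 b p pc c stk hpc
    · exfalso
      split_ifs at hfs <;> omega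
  | succ g ih =>
    intro b p pc c stk hyp
    by_cases hpc : pc = 0
    · exact simZero tb (g + 1) b p pc c stk hpc
    · rcases hyp with h0 | ⟨hsh, hfs⟩
      · exact absurd h0 hpc
      obtain ⟨n, hn, heq⟩ := simInner tb g ih (colsFrom c) c rfl b p pc stk hsh hpc hfs
      refine ⟨n, ?_, ?_⟩
      · have h7 := colsFrom_len c
        have hM := mCost_ge g
        have : n ≤ 7 * (mCost g + 2) :=
          le_trans hn (Nat.mul_le_mul_right _ h7)
        rw [mCost]
        omega
      · intro f
        rw [heq f]
        unfold sres
        rw [if_neg hpc]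

-- ===== VERDICT (by name: the statement is the Claim_ definition above) =====
theorem dfs_find_sequence_spec : Claim_equal_dfs_find_sequence := by
  intro tb cb ms p pc hdom hpre
  unfold Spec_dfs_find_sequence dfs_find_sequence dfs_find_sequence_alt
  have hyp : pc = 0 ∨ (Shape cb ∧ zeros42 cb + (if p = 0 then 2 else 1) ≤ 49) := by
    rcases hpre with h0 | ⟨_, hlen, _, hrows⟩
    · exact Or.inl h0
    · refine Or.inr ⟨⟨hlen, hrows⟩, ?_⟩
      have := zeros42_le cb
      split_ifs <;> omega
  obtain ⟨n, hn, heq⟩ := simMain tb 49 cb p pc 0 [] hyp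
  have hA : dfsA tb 50 cb p pc = sres tb 49 cb p pc 0 := by
    have := dfsA_succ tb cb 49 p pc
    norm_num at this ⊢
    exact this
  have hfuel : mCost 50 = n + (mCost 50 - n - 1) + 1 := by
    have h2 := mCost_le_succ 49
    norm_num at h2
    omega
  rw [hA, hfuel, heq]
  by_cases hs : sres tb 49 cb p pc 0 = true
  · rw [hs]
    simp
  · have hsf : sres tb 49 cb p pc 0 = false := Bool.eq_false_iff.mpr hs
    rw [hsf]
    simp [popRun]
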